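-- pv_equiv track=rewrite | github.com/GitHCQ/FirstYear-EII | FI/funciones2/8.py | contorno_cuadrado
-- ===== SOURCE A (Python) =====
-- def contorno_cuadrado(ch,n):
--     cuadrado=""
--     for i in range(n):
--         if i==0 or i==n-1:
--             cuadrado+=ch*(2*n)+"\n"
--         else:
--             cuadrado+=ch+" "*(2*n-2)+ch+"\n"
--     return cuadrado
-- ===== SOURCE B (Python) =====
-- def contorno_cuadrado(ch, n):
--     if n < 1:
--         return ""
--     top = ch * (2 * n) + "\n"
--     if n == 1:
--         return top
--     mid = ch + " " * (2 * n - 2) + ch + "\n"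
--     return top + mid * (n - 2) + top
-- ===== Notes on version B (the rewrite author's own statement) =====
-- stated objective: simpler
-- what changed: Replaces A's per-row loop with per-row branch by closed-form construction: the boundary row and the hollow middle row are each built once and the middle rows are produced by string repetition.
import Mathlib
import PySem

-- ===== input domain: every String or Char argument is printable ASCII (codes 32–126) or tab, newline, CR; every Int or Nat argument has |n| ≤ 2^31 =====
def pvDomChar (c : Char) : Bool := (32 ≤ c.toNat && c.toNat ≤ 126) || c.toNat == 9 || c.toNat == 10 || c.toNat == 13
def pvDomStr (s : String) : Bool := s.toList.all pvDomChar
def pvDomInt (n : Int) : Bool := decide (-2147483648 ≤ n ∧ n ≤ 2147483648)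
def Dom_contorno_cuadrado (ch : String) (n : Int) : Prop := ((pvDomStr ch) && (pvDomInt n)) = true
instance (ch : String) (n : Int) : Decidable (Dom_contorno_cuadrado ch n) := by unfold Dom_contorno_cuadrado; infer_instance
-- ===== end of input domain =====

-- B replaces A's per-row loop by closed-form string repetition: the boundary row is built
-- once and the identical middle rows are produced by repetition (objective: simpler).

-- ===== PORT A =====
-- A's per-row loop: for i in range(n), append a full row or a hollow row to the accumulator.
def contorno_cuadrado (ch : String) (n : Int) : String :=
  String.ofList <|
    (PySem.List.pyRange 0 n).foldl
      (fun cuadrado i =>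
        if i == 0 || i == n - 1 then
          cuadrado ++ PySem.List.pyRepeat ch.toList (2 * n) ++ ['\n']
        else
          cuadrado ++ ch.toList ++ PySem.List.pyRepeat [' '] (2 * n - 2) ++ ch.toList ++ ['\n'])
      []

-- ===== PORT B =====
def contorno_cuadrado_alt (ch : String) (n : Int) : String :=
  if n < 1 then ""
  else
    let top := PySem.List.pyRepeat ch.toList (2 * n) ++ ['\n']
    if n == 1 then String.ofList top
    else
      let mid := ch.toList ++ PySem.List.pyRepeat [' '] (2 * n - 2) ++ ch.toList ++ ['\n']
      String.ofList (top ++ PySem.List.pyRepeat mid (n - 2) ++ top)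

-- ===== PRECONDITION & SPEC =====
def Spec_contorno_cuadrado (ch : String) (n : Int) (out : String) : Prop := out = contorno_cuadrado_alt ch n
instance (ch : String) (n : Int) (out : String) : Decidable (Spec_contorno_cuadrado ch n out) := by unfold Spec_contorno_cuadrado; infer_instance

-- ===== CLAIM (what is proved, stated in full; the proofs are below) =====
def Claim_equal_contorno_cuadrado : Prop := ∀ (ch : String) (n : Int), Dom_contorno_cuadrado ch n → Spec_contorno_cuadrado ch n (contorno_cuadrado ch n)

-- ===== LEMMAS AND PROOFS =====

-- a flatMap over a list on which g is constantly `mid` is `mid` repeated length-many times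
theorem flatMap_const_of_mem {α β : Type} (g : α → List β) (mid : List β) :
    ∀ (l : List α), (∀ x ∈ l, g x = mid) → l.flatMap g = (List.replicate l.length mid).flatten := by
  intro l
  induction l with
  | nil => intro _; rfl
  | cons a t ih =>
    intro h
    simp only [List.flatMap_cons, List.length_cons, List.replicate_succ, List.flatten_cons]
    rw [h a (by simp), ih (fun x hx => h x (by simp [hx]))]

-- ===== VERDICT (by name: the statement is the Claim_ definition above) =====
theorem contorno_cuadrado_spec : Claim_equal_contorno_cuadrado := by
  intro ch n _
  unfold Spec_contorno_cuadrado contorno_cuadrado contorno_cuadrado_alt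
  set top := PySem.List.pyRepeat ch.toList (2 * n) ++ ['\n'] with htop
  set mid := ch.toList ++ PySem.List.pyRepeat [' '] (2 * n - 2) ++ ch.toList ++ ['\n'] with hmid
  have hbody :
      (PySem.List.pyRange 0 n).foldl
        (fun cuadrado i =>
          if i == 0 || i == n - 1 then
            cuadrado ++ PySem.List.pyRepeat ch.toList (2 * n) ++ ['\n']
          else
            cuadrado ++ ch.toList ++ PySem.List.pyRepeat [' '] (2 * n - 2) ++ ch.toList ++ ['\n'])
        [] =
      (PySem.List.pyRange 0 n).flatMap
        (fun i => if i == 0 || i == n - 1 then top else mid) := by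
    have hc : (PySem.List.pyRange 0 n).foldl
        (fun cuadrado i =>
          if i == 0 || i == n - 1 then
            cuadrado ++ PySem.List.pyRepeat ch.toList (2 * n) ++ ['\n']
          else
            cuadrado ++ ch.toList ++ PySem.List.pyRepeat [' '] (2 * n - 2) ++ ch.toList ++ ['\n'])
        [] =
        (PySem.List.pyRange 0 n).foldl
          (fun acc i => acc ++ (if i == 0 || i == n - 1 then top else mid)) [] := by
      apply PySem.List.foldl_congr_mem
      intro acc i _
      by_cases h : (i == 0 || i == n - 1) = true <;> simp [h, htop, hmid]
    rw [hc, PySem.List.foldl_append_eq_flatMap, List.nil_append]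
  rw [hbody]
  by_cases h1 : n < 1
  · rw [if_pos h1, PySem.List.pyRange_one_eq_nil (by omega)]
    rfl
  · rw [if_neg h1]
    by_cases h2 : n = 1
    · subst h2
      have hr : PySem.List.pyRange 0 1 = [0] := by
        rw [PySem.List.pyRange_one_cons (by omega), PySem.List.pyRange_one_eq_nil (by omega)]
      simp [hr]
    · rw [if_neg (by simpa using h2)]
      -- n ≥ 2: split the range as [0] ++ middle ++ [n-1]
      have hsplit : PySem.List.pyRange 0 n = 0 :: (PySem.List.pyRange 1 (n - 1) ++ [n - 1]) := by
        rw [PySem.List.pyRange_one_cons (by omega)]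
        congr 1
        have : n = (n - 1) + 1 := by omega
        rw [this, PySem.List.pyRange_one_succ_right (by omega)]
        simp
      rw [hsplit]
      simp only [List.flatMap_cons, List.flatMap_append, List.flatMap_cons, List.flatMap_nil]
      have hmidmap : (PySem.List.pyRange 1 (n - 1)).flatMap
          (fun i => if i == 0 || i == n - 1 then top else mid) =
          PySem.List.pyRepeat mid (n - 2) := by
        rw [flatMap_const_of_mem _ mid _ (by
          intro x hx
          rw [PySem.List.mem_pyRange_one] at hx
          have : (x == 0 || x == n - 1) = false := by
            simp only [Bool.or_eq_false_iff, beq_eq_false_iff_ne]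
            omega
          simp [this])]
        rw [PySem.List.length_pyRange_one, PySem.List.pyRepeat]
        congr 2
        omega
      have h0 : ((0 : Int) == 0 || (0 : Int) == n - 1) = true := by simp
      have hn1 : ((n - 1 : Int) == 0 || (n - 1 : Int) == n - 1) = true := by simp
      rw [h0, hn1, hmidmap]
      simp
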